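-- pv_equiv track=rewrite | github.com/cserby/aoc2022 | day8/__main__.py | visible_in_line
-- ===== SOURCE A (Python) =====
-- from typing import List
--
-- def visible_in_line(line: List[int]) -> List[bool]:
--     prev_max = None
--     visible = []
--     for elem in line:
--         if prev_max is None or elem > prev_max:
--             visible.append(True)
--             prev_max = elem
--         else:
--             visible.append(False)
--     return visible
-- ===== SOURCE B (Python) =====
-- from typing import List
--
-- def visible_in_line(line: List[int]) -> List[bool]:
--     return [all(prev < elem for prev in line[:i]) for i, elem in enumerate(line)]
-- ===== Notes on version B (the rewrite author's own statement) =====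
-- stated objective: idiomatic
-- what changed: Replaces the stateful running-max loop with a single comprehension that marks position i visible iff the element exceeds every element of the prefix line[:i].
import Mathlib
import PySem

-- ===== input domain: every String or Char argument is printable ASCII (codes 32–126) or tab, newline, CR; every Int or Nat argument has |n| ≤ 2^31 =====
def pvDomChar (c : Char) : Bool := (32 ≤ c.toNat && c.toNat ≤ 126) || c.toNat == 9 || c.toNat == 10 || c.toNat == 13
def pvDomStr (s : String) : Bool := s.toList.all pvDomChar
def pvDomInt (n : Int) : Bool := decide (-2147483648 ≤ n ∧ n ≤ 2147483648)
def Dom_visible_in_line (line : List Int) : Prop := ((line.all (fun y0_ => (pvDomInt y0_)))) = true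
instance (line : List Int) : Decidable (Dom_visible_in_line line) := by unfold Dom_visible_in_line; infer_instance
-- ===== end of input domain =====

-- B replaces A's stateful running-max loop by a comprehension testing each element against its whole prefix (idiomatic, not faster).

-- ===== PORT A =====
-- literal port of A's loop: state = (prev_max, visible), appending to visible
def visible_in_line (line : List Int) : List Bool :=
  (line.foldl (fun (st : Option Int × List Bool) elem =>
      match st.1 with
      | none => (some elem, st.2 ++ [true])
      | some m => if elem > m then (some elem, st.2 ++ [true]) else (st.1, st.2 ++ [false]))
    (none, [])).2

-- ===== PORT B =====
-- literal port of B: [all(prev < elem for prev in line[:i]) for i, elem in enumerate(line)]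
def visible_in_line_alt (line : List Int) : List Bool :=
  (PySem.List.enumerate line).map
    (fun p => (PySem.List.slice line none (some p.1)).all (fun prev => decide (prev < p.2)))

-- ===== PRECONDITION & SPEC =====
def Spec_visible_in_line (line : List Int) (out : List Bool) : Prop := out = visible_in_line_alt line
instance (line : List Int) (out : List Bool) : Decidable (Spec_visible_in_line line out) := by unfold Spec_visible_in_line; infer_instance

-- ===== CLAIM (what is proved, stated in full; the proofs are below) =====
def Claim_equal_visible_in_line : Prop := ∀ (line : List Int), Dom_visible_in_line line → Spec_visible_in_line line (visible_in_line line)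

-- ===== LEMMAS AND PROOFS =====

-- A's loop body, named for the lemmas
def pvStepA (st : Option Int × List Bool) (elem : Int) : Option Int × List Bool :=
  match st.1 with
  | none => (some elem, st.2 ++ [true])
  | some m => if elem > m then (some elem, st.2 ++ [true]) else (st.1, st.2 ++ [false])

-- the running maximum A maintains over a consumed prefix
def pvRunMax (pre : List Int) : Option Int :=
  pre.foldl (fun m x => match m with
    | none => some x
    | some v => if x > v then some x else some v) none

-- common recursive middle ground: "visible" over the remaining list, given the consumed prefix
def pvGo (pre l : List Int) : List Bool :=
  match l with
  | [] => []
  | e :: rest => (pre.all (fun p => decide (p < e))) :: pvGo (pre ++ [e]) rest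

lemma pvRunMax_none (pre : List Int) (h : pvRunMax pre = none) : pre = [] := by
  cases pre with
  | nil => rfl
  | cons x xs =>
    exfalso
    have aux : ∀ (l : List Int) (v : Int),
        l.foldl (fun m x => match m with
          | none => some x
          | some v => if x > v then some x else some v) (some v) ≠ none := by
      intro l
      induction l with
      | nil => intro v h; simp at h
      | cons y ys ih => intro v h; simp only [List.foldl_cons] at h; split at h <;> exact ih _ h
    exact aux xs x (by simpa [pvRunMax] using h)

lemma pvRunMax_append (pre : List Int) (e : Int) :
    pvRunMax (pre ++ [e]) = match pvRunMax pre with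
      | none => some e
      | some v => if e > v then some e else some v := by
  simp [pvRunMax, List.foldl_append]

lemma pvRunMax_all (pre : List Int) (e : Int) :
    (match pvRunMax pre with | none => true | some v => decide (v < e))
      = pre.all (fun p => decide (p < e)) := by
  induction pre using List.reverseRecOn with
  | nil => simp [pvRunMax]
  | append_singleton pre x ih =>
    rw [pvRunMax_append]
    cases h : pvRunMax pre with
    | none =>
      have : pre = [] := pvRunMax_none pre h
      subst this; simp
    | some v =>
      rw [h] at ih
      by_cases hxv : x > v
      · simp only [hxv, if_pos, List.all_append, ← ih]
        by_cases hxe : x < e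
        · have : v < e := by omega
          simp [hxe, this]
        · simp [hxe]
      · simp only [if_neg hxv, List.all_append, ← ih]
        by_cases hve : v < e
        · have : x < e := by omega
          simp [hve, this]
        · simp [hve]

lemma foldlA_go (l : List Int) : ∀ (pre : List Int) (acc : List Bool),
    (l.foldl pvStepA (pvRunMax pre, acc)).2 = acc ++ pvGo pre l := by
  induction l with
  | nil => intro pre acc; simp [pvGo]
  | cons e rest ih =>
    intro pre acc
    simp only [List.foldl_cons, pvGo]
    have hcond := pvRunMax_all pre e
    have happ := pvRunMax_append pre e
    cases h : pvRunMax pre with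
    | none =>
      have hpre : pre = [] := pvRunMax_none pre h
      simp only [h] at hcond happ
      simp only [pvStepA]
      have : (some e : Option Int) = pvRunMax (pre ++ [e]) := by rw [happ]
      rw [this, ih (pre ++ [e]) (acc ++ [true]), ← hcond]
      simp
    | some v =>
      simp only [h] at hcond happ
      simp only [pvStepA]
      by_cases hev : e > v
      · rw [if_pos hev] at happ ⊢
        have : (some e : Option Int) = pvRunMax (pre ++ [e]) := by rw [happ]
        rw [this, ih (pre ++ [e]) (acc ++ [true]), ← hcond]
        have : decide (v < e) = true := by simpa using hev
        simp [this]
      · rw [if_neg hev] at happ ⊢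
        have : (some v : Option Int) = pvRunMax (pre ++ [e]) := by rw [happ]
        rw [this, ih (pre ++ [e]) (acc ++ [false]), ← hcond]
        have : decide (v < e) = false := by simpa using hev
        simp [this]

lemma altB_go (l : List Int) : ∀ (pre line : List Int), line = pre ++ l →
    (PySem.List.enumerate l (pre.length : Int)).map
      (fun p => (PySem.List.slice line none (some p.1)).all (fun prev => decide (prev < p.2)))
      = pvGo pre l := by
  induction l with
  | nil => intro pre line _; simp [PySem.List.enumerate, pvGo]
  | cons e rest ih =>
    intro pre line hline
    rw [PySem.List.enumerate_cons, List.map_cons, pvGo]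
    congr 1
    · rw [PySem.List.slice_to line (by positivity)]
      simp only [Int.toNat_natCast, hline, List.take_left]
    · have : ((pre.length : Int) + 1) = ((pre ++ [e]).length : Int) := by simp
      rw [this, ih (pre ++ [e]) line (by simp [hline])]

-- ===== VERDICT (by name: the statement is the Claim_ definition above) =====
theorem visible_in_line_spec : Claim_equal_visible_in_line := by
  intro line _
  show visible_in_line line = visible_in_line_alt line
  have hA : visible_in_line line = pvGo [] line := by
    have := foldlA_go line [] []
    simpa [visible_in_line, pvStepA, pvRunMax] using this
  have hB : visible_in_line_alt line = pvGo [] line := by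
    have := altB_go line [] line rfl
    simpa [visible_in_line_alt, PySem.List.enumerate] using this
  rw [hA, hB]
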